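-- pv_equiv track=rewrite | github.com/tomheon/diffscuss | diffscuss/find_local.py | _closest_line_num
-- ===== SOURCE A (Python) =====
-- def _closest_line_num(fil, orig_line_num, orig_line):
--     """
--     Find the line in @fil that best matches the @orig_line found at
--     @orig_line_num.
--
--     This is currently done by:
--
--     - finding all the lines in @fil that, when stripped, match the
--       @orig_line exactly
--
--     - returning the number the matching line with the smallest
--       absolutely distance from @orig_line_num, in a tuple (True,
--       line_num)
--
--     - if no matching lines are found, returning (False, @orig_line_num)
--
--     This works decently for a broad number of cases, but could also be
--     improved for cases in which the @orig_line has subsequently been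
--     modified.
--     """
--     # skip the first char, which is either +, -, or ' ', since
--     # orig_line is a diff line
--     orig_line = orig_line[1:].strip()
--     matching_line_nums = []
--
--     for ind, line in enumerate(fil):
--         line = line.strip()
--         if orig_line and orig_line == line:
--             matching_line_nums.append(ind + 1)
--
--     if not matching_line_nums:
--         return (False, orig_line_num)
--
--     matching_line_nums = [(abs(line_num - orig_line_num), line_num)
--                           for line_num
--                           in matching_line_nums]
--     matching_line_nums.sort()
--
--     return (True, matching_line_nums[0][1])
-- ===== SOURCE B (Python) =====
-- def _closest_line_num(fil, orig_line_num, orig_line):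
--     orig_line = orig_line[1:].strip()
--     best = None  # (distance, line_num) of the best match so far
--     for ind, line in enumerate(fil):
--         if orig_line and orig_line == line.strip():
--             dist = abs((ind + 1) - orig_line_num)
--             if best is None or dist < best[0]:
--                 best = (dist, ind + 1)
--     if best is None:
--         return (False, orig_line_num)
--     return (True, best[1])
-- ===== Notes on version B (the rewrite author's own statement) =====
-- stated objective: simpler
-- what changed: Replaces A's collect-matching-lines / decorate-with-distance / sort / take-first pipeline with a single running-minimum pass over enumerate(fil) (strict < keeps the smallest line number on distance ties).
import Mathlib
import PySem

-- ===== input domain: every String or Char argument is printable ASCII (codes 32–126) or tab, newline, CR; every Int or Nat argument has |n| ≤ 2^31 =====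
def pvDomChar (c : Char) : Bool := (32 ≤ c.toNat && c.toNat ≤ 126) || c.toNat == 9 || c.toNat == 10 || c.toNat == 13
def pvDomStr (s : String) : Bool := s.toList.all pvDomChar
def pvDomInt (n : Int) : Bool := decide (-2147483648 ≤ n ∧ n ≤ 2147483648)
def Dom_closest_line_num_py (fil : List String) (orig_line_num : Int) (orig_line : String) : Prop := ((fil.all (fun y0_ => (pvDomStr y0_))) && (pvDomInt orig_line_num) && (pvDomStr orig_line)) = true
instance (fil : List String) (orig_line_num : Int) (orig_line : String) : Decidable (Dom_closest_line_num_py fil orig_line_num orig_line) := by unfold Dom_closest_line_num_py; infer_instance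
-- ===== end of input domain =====

-- B replaces A's collect-matches / decorate-with-distance / sort / take-head pipeline by a
-- single running-minimum pass over enumerate(fil); same return value everywhere (simpler).

-- ===== PORT A =====
def closest_line_num_py (fil : List String) (orig_line_num : Int) (orig_line : String) : Bool × Int :=
  let ol := PySem.Str.strip (PySem.Str.slice orig_line (some 1) none)
  let ms := (PySem.List.enumerate fil 0).foldl
    (fun acc p => if (ol != "") && (ol == PySem.Str.strip p.2) then acc ++ [p.1 + 1] else acc) []
  if ms = [] then (false, orig_line_num)
  else
    let pairs := ms.map (fun ln => (|ln - orig_line_num|, ln))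
    let srt := PySem.List.sorted2 pairs (·.1) (·.2)
    (true, (srt.headD (0, 0)).2)

-- ===== PORT B =====
def closest_line_num_py_alt (fil : List String) (orig_line_num : Int) (orig_line : String) : Bool × Int :=
  let ol := PySem.Str.strip (PySem.Str.slice orig_line (some 1) none)
  let best := (PySem.List.enumerate fil 0).foldl
    (fun best p =>
      if (ol != "") && (ol == PySem.Str.strip p.2) then
        let dist := |(p.1 + 1) - orig_line_num|
        -- 'if best is None or dist < best[0]: best = (dist, ind + 1)'
        best.elim (some (dist, p.1 + 1)) (fun b => if dist < b.1 then some (dist, p.1 + 1) else some b)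
      else best) none
  best.elim (false, orig_line_num) (fun b => (true, b.2))

-- ===== PRECONDITION & SPEC =====
def Spec_closest_line_num_py (fil : List String) (orig_line_num : Int) (orig_line : String) (out : Bool × Int) : Prop := out = closest_line_num_py_alt fil orig_line_num orig_line
instance (fil : List String) (orig_line_num : Int) (orig_line : String) (out : Bool × Int) : Decidable (Spec_closest_line_num_py fil orig_line_num orig_line out) := by unfold Spec_closest_line_num_py; infer_instance

-- ===== CLAIM (what is proved, stated in full; the proofs are below) =====
def Claim_equal_closest_line_num_py : Prop := ∀ (fil : List String) (orig_line_num : Int) (orig_line : String), Dom_closest_line_num_py fil orig_line_num orig_line → Spec_closest_line_num_py fil orig_line_num orig_line (closest_line_num_py fil orig_line_num orig_line)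

-- ===== LEMMAS AND PROOFS =====

-- the lexicographic "comes strictly before" test sorted2 uses on (dist, line_num) pairs
def pvBef (a b : Int × Int) : Bool :=
  decide (a.1 < b.1) || (!decide (b.1 < a.1) && decide (a.2 < b.2))

-- running head-min step: the head of the sorted list after inserting x
def pvHm (h x : Int × Int) : Int × Int := if pvBef x h then x else h

theorem pvBef_sorted2 (xs : List (Int × Int)) :
    PySem.List.sorted2 xs (·.1) (·.2) =
      xs.foldl (fun acc x => PySem.List.insertBy pvBef x acc) [] := rfl

-- head of insertBy into a nonempty list
theorem pvHead_insertBy (x a : Int × Int) (l : List (Int × Int)) :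
    ∃ t, PySem.List.insertBy pvBef x (a :: l) = pvHm a x :: t := by
  by_cases h : pvBef x a = true
  · exact ⟨a :: l, by simp [PySem.List.insertBy, pvHm, h]⟩
  · exact ⟨PySem.List.insertBy pvBef x l, by simp [PySem.List.insertBy, pvHm, h]⟩

-- S1: the head of the insertion-sort fold is the pvHm running fold
theorem pvHead_sort_fold (xs : List (Int × Int)) :
    ∀ (a : Int × Int) (l : List (Int × Int)),
      ∃ t, xs.foldl (fun acc x => PySem.List.insertBy pvBef x acc) (a :: l)
            = xs.foldl pvHm a :: t := by
  induction xs with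
  | nil => intro a l; exact ⟨l, rfl⟩
  | cons x xs ih =>
      intro a l
      obtain ⟨t, ht⟩ := pvHead_insertBy x a l
      obtain ⟨t', ht'⟩ := ih (pvHm a x) t
      exact ⟨t', by simp only [List.foldl_cons, ht, ht']⟩

-- S3: B's running-min step agrees with pvHm on the decorated pairs, as long as the
-- current best's line number precedes every remaining matched line number
theorem pvFoldB_eq_hm (n : Int) (ms : List Int) :
    ∀ (p : Int × Int), (∀ m ∈ ms, p.2 < m) → ms.Pairwise (· < ·) →
      ms.foldl (fun best ln =>
          best.elim (some (|ln - n|, ln)) (fun b => if |ln - n| < b.1 then some (|ln - n|, ln) else some b))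
        (some p)
      = some ((ms.map (fun ln => (|ln - n|, ln))).foldl pvHm p) := by
  induction ms with
  | nil => intro p _ _; rfl
  | cons m ms ih =>
      intro p hlt hpw
      have hm2 : p.2 < m := hlt m (by simp)
      have hbef : pvBef (|m - n|, m) p = (decide (|m - n| < p.1)) := by
        simp only [pvBef]
        by_cases h1 : |m - n| < p.1 <;> by_cases h2 : p.1 < |m - n| <;>
          simp [h1, h2] <;> omega
      have hstep : pvHm p (|m - n|, m) = if |m - n| < p.1 then (|m - n|, m) else p := by
        simp [pvHm, hbef]
      have hpw' : ms.Pairwise (· < ·) := (List.pairwise_cons.mp hpw).2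
      have hmlt : ∀ x ∈ ms, m < x := (List.pairwise_cons.mp hpw).1
      simp only [List.foldl_cons, List.map_cons, Option.elim, hstep]
      by_cases hd : |m - n| < p.1
      · rw [if_pos hd, if_pos hd]
        exact ih (|m - n|, m) (fun x hx => hmlt x hx) hpw'
      · rw [if_neg hd, if_neg hd]
        exact ih p (fun x hx => lt_trans hm2 (hmlt x hx)) hpw'

-- A's accumulator loop builds exactly filter-then-map
theorem pvMs_eq (ol : String) (l : List (Int × String)) :
    l.foldl (fun acc p => if (ol != "") && (ol == PySem.Str.strip p.2) then acc ++ [p.1 + 1] else acc) []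
      = (l.filter (fun p => (ol != "") && (ol == PySem.Str.strip p.2))).map (fun p => p.1 + 1) := by
  simpa using PySem.List.foldl_append_if (fun p => (ol != "") && (ol == PySem.Str.strip p.2)) (fun p => p.1 + 1) l []

-- B's loop over enumerate equals the same loop over the matched line numbers
theorem pvB_fold_eq (ol : String) (n : Int) (l : List (Int × String)) :
    l.foldl (fun best p =>
        if (ol != "") && (ol == PySem.Str.strip p.2) then
          best.elim (some (|(p.1 + 1) - n|, p.1 + 1))
            (fun b => if |(p.1 + 1) - n| < b.1 then some (|(p.1 + 1) - n|, p.1 + 1) else some b)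
        else best) (none : Option (Int × Int))
      = ((l.filter (fun p => (ol != "") && (ol == PySem.Str.strip p.2))).map (fun p => p.1 + 1)).foldl
          (fun best ln =>
            best.elim (some (|ln - n|, ln)) (fun b => if |ln - n| < b.1 then some (|ln - n|, ln) else some b))
          none := by
  rw [List.foldl_map, PySem.List.foldl_if_eq_foldl_filter]

-- the matched line numbers are strictly increasing
theorem pvMs_pairwise (q : (Int × String) → Bool) (fil : List String) :
    (((PySem.List.enumerate fil 0).filter q).map (fun p => p.1 + 1)).Pairwise (· < ·) := by
  rw [List.pairwise_map]
  exact ((PySem.List.pairwise_lt_enumerate fil 0).sublist List.filter_sublist).imp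
    (by intro a b h; omega)

theorem closest_eq (fil : List String) (orig_line_num : Int) (orig_line : String) :
    closest_line_num_py fil orig_line_num orig_line
      = closest_line_num_py_alt fil orig_line_num orig_line := by
  simp only [closest_line_num_py, closest_line_num_py_alt]
  set ol := PySem.Str.strip (PySem.Str.slice orig_line (some 1) none) with hol
  set n := orig_line_num
  rw [pvMs_eq, pvB_fold_eq]
  set ms := ((PySem.List.enumerate fil 0).filter
      (fun p => (ol != "") && (ol == PySem.Str.strip p.2))).map (fun p => p.1 + 1) with hms
  have hpw : ms.Pairwise (· < ·) := hms ▸ pvMs_pairwise _ fil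
  clear_value ms
  cases ms with
  | nil => simp
  | cons m rest =>
      have hrest : ∀ x ∈ rest, m < x := (List.pairwise_cons.mp hpw).1
      have hpw' : rest.Pairwise (· < ·) := (List.pairwise_cons.mp hpw).2
      -- B side: first iteration seeds the best with (|m-n|, m)
      have hB := pvFoldB_eq_hm n rest (|m - n|, m) hrest hpw'
      -- A side: head of the sort
      have hsort := pvBef_sorted2 ((m :: rest).map (fun ln => (|ln - n|, ln)))
      obtain ⟨t, ht⟩ := pvHead_sort_fold (rest.map (fun ln => (|ln - n|, ln))) (|m - n|, m) []
      simp only [List.map_cons, List.foldl_cons] at hsort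
      rw [show PySem.List.insertBy pvBef (|m - n|, m) [] = [(|m - n|, m)] from rfl] at hsort
      rw [ht] at hsort
      simp only [List.foldl_cons, List.map_cons, Option.elim_none, Option.elim_some, hB]
      rw [hsort]
      simp

-- ===== VERDICT (by name: the statement is the Claim_ definition above) =====
theorem closest_line_num_py_spec : Claim_equal_closest_line_num_py := by
  intro fil n ol _
  unfold Spec_closest_line_num_py
  exact closest_eq fil n ol
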